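-- pv_equiv track=rewrite | github.com/DhruvSrivastava-16/CompetitiveCoding | parata_spoj.py | poss_check
-- ===== SOURCE A (Python) =====
-- def poss_check(R,L,P,mid):
--
--     count = 0;
--
--     par_list = [0 for i in range(L)]
--     i = 0;
--     t_par = 0
--     tl_par = 0
--
--
--     for i in range(L):
--         t = R[i];
--         tl_par = 0
--         total_time = 0
--         k = 2
--         while  total_time + t <= mid:
--             t_par +=1
--             tl_par += 1
--             total_time += t
--             t = R[i]*k;
--             k+=1
--
--
--     if(t_par>=P):
--         return True
--
--     else:
--         return False
-- ===== SOURCE B (Python) =====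
-- from math import isqrt
--
-- def poss_check(R, L, P, mid):
--     # Closed form per cook: the i-th paratha of a cook with rank t takes t*i
--     # minutes, so n parathas take t*n*(n+1)/2 minutes; the largest feasible n
--     # is ((isqrt(8*(mid//t)+1)) - 1) // 2.
--     total = 0
--     for i in range(L):
--         t = R[i]
--         if t > mid:
--             continue
--         m = mid // t
--         total += (isqrt(8 * m + 1) - 1) // 2
--     return total >= P
-- ===== Notes on version B (the rewrite author's own statement) =====
-- stated objective: alternative
-- what changed: Replaces A's per-cook while loop (one iteration per paratha) by a closed-form count via integer square root: the largest n with t*n*(n+1)/2 <= mid is (isqrt(8*(mid//t)+1)-1)//2; intended as faster (O(L) vs O(L*sqrt(mid/Rmin))), but a timing run could not confirm a clean reading since A times out on the large inputs.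
import Mathlib
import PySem

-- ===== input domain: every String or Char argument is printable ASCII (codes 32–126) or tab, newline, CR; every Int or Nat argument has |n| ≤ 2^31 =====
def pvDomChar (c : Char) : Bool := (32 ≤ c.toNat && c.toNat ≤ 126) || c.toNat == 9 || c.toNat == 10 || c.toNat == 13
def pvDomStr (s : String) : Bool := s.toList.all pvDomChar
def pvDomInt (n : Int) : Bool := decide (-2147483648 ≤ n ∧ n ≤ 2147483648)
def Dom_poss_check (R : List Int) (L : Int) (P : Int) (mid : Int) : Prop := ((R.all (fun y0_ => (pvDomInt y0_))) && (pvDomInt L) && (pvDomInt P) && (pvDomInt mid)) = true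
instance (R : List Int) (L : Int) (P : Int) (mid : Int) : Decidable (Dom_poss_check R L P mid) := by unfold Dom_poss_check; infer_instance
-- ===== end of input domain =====

-- B replaces A's per-cook while loop (one iteration per paratha) by a closed-form
-- count using an integer square root (a different algorithm; objective: alternative).

-- ===== PORT A =====
-- Inner while loop of A: state (t, total_time, k); fuel only makes the Python
-- while loop total (mid.toNat + 1 iterations always suffice on Pre_; outside
-- Pre_ the Python loop diverges).
def pyLoopA (Ri mid : Int) : Nat → Int → Int → Int → Int
  | 0, _, _, _ => 0
  | fuel+1, t, tot, k =>
    if tot + t ≤ mid then 1 + pyLoopA Ri mid fuel (Ri * k) (tot + t) (k + 1) else 0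

-- (A's locals count, par_list, tl_par are dead: they never affect the result.)
def poss_check (R : List Int) (L : Int) (P : Int) (mid : Int) : Bool :=
  let t_par := (List.range L.toNat).foldl
    (fun acc i => acc + pyLoopA (R.getD i 0) mid (mid.toNat + 1) (R.getD i 0) 0 2) 0
  decide (P ≤ t_par)

-- ===== PORT B =====
-- Per-cook closed form: largest n with t*n*(n+1)/2 ≤ mid, via isqrt.
def altCount (t mid : Int) : Int :=
  if mid < t then 0
  else
    let m := PySem.Int.floordiv mid t
    PySem.Int.floordiv ((Nat.sqrt (8 * m + 1).toNat : Int) - 1) 2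

def poss_check_alt (R : List Int) (L : Int) (P : Int) (mid : Int) : Bool :=
  let total := (List.range L.toNat).foldl
    (fun acc i => acc + altCount (R.getD i 0) mid) 0
  decide (P ≤ total)

-- ===== PRECONDITION & SPEC =====
-- Pre_ excludes exactly the inputs where the Python A does not return: L beyond
-- len(R) (IndexError) and any cook with R[i] ≤ 0 whose loop is entered, i.e.
-- R[i] ≤ mid (A's while loop then never terminates).
def Pre_poss_check (R : List Int) (L : Int) (P : Int) (mid : Int) : Prop :=
  L ≤ (R.length : Int) ∧ ∀ i ∈ List.range L.toNat, 0 < R.getD i 0 ∨ mid < R.getD i 0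
instance (R : List Int) (L : Int) (P : Int) (mid : Int) : Decidable (Pre_poss_check R L P mid) := by
  unfold Pre_poss_check; infer_instance

def pvWitness_poss_check : List Int × Int × Int × Int := ([2, 3], 2, 3, 10)

def Spec_poss_check (R : List Int) (L : Int) (P : Int) (mid : Int) (out : Bool) : Prop := out = poss_check_alt R L P mid
instance (R : List Int) (L : Int) (P : Int) (mid : Int) (out : Bool) : Decidable (Spec_poss_check R L P mid out) := by unfold Spec_poss_check; infer_instance

-- ===== CLAIM (what is proved, stated in full; the proofs are below) =====
def Claim_equal_poss_check : Prop := ∀ (R : List Int) (L : Int) (P : Int) (mid : Int), Dom_poss_check R L P mid → Pre_poss_check R L P mid → Spec_poss_check R L P mid (poss_check R L P mid)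

-- ===== LEMMAS AND PROOFS =====

-- Triangular numbers, as A accumulates them.
def tri : Nat → Nat
  | 0 => 0
  | n + 1 => tri n + (n + 1)

theorem two_tri (n : Nat) : 2 * tri n = n * (n + 1) := by
  induction n with
  | zero => rfl
  | succ n ih => simp only [tri]; rw [Nat.mul_add, ih]; ring

theorem le_tri (n : Nat) : n ≤ tri n := by
  induction n with
  | zero => exact Nat.le_refl 0
  | succ n ih => simp only [tri]; omega

-- B's per-cook count, as a natural number.
def nb (t mid : Int) : Nat :=
  if mid < t then 0
  else (Nat.sqrt (8 * (PySem.Int.floordiv mid t) + 1).toNat - 1) / 2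

-- Nat core: tri n ≤ M ↔ n ≤ (√(8M+1) - 1)/2.
theorem tri_le_iff (M n : Nat) :
    tri n ≤ M ↔ n ≤ (Nat.sqrt (8 * M + 1) - 1) / 2 := by
  have hs1 : 1 ≤ Nat.sqrt (8 * M + 1) := by
    have := Nat.sqrt_pos.mpr (show 0 < 8 * M + 1 by omega)
    omega
  have hsq : (2 * n + 1) * (2 * n + 1) = 8 * tri n + 1 := by
    have := two_tri n; nlinarith
  have h1 : n ≤ (Nat.sqrt (8 * M + 1) - 1) / 2 ↔ 2 * n + 1 ≤ Nat.sqrt (8 * M + 1) := by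
    omega
  rw [h1, Nat.le_sqrt, hsq]
  omega

-- Loop-condition characterisation: for admitted cooks, entering iteration n
-- (n ≥ 1) is exactly n ≤ nb t mid.
theorem cond_iff (t mid : Int) (hpos : 0 < t) (n : Nat) (hn : 1 ≤ n) :
    t * (tri n : Int) ≤ mid ↔ (n ≤ nb t mid) := by
  by_cases hmt : mid < t
  · have htri : (1 : Int) ≤ (tri n : Int) := by exact_mod_cast Nat.le_trans hn (le_tri n)
    constructor
    · intro hle
      exfalso
      have : t ≤ t * (tri n : Int) := le_mul_of_one_le_right (le_of_lt hpos) htri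
      omega
    · intro hle
      simp [nb, hmt] at hle
      omega
  · push_neg at hmt
    have hm0 : 0 ≤ PySem.Int.floordiv mid t := by
      rw [PySem.Int.floordiv_eq_ediv_of_pos hpos]
      exact Int.ediv_nonneg (le_trans (le_of_lt hpos) hmt) (le_of_lt hpos)
    set m := PySem.Int.floordiv mid t with hm
    have h1 : t * (tri n : Int) ≤ mid ↔ (tri n : Int) ≤ m := by
      rw [hm, PySem.Int.le_floordiv_iff_mul_le hpos, mul_comm]
    have h2 : (tri n : Int) ≤ m ↔ tri n ≤ m.toNat := by omega
    have h3 : (8 * m + 1).toNat = 8 * m.toNat + 1 := by omega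
    rw [h1, h2, tri_le_iff]
    simp only [nb, if_neg (not_lt.mpr hmt), ← hm, h3]

-- Running A's inner loop from the state reached after j iterations yields
-- nb t mid - j, given enough fuel and j ≤ nb t mid.
theorem loopA_run (t mid : Int) (hpos : 0 < t) :
    ∀ (fuel j : Nat), j ≤ nb t mid → nb t mid - j < fuel →
      pyLoopA t mid fuel (t * ((j : Int) + 1)) (t * (tri j : Int)) ((j : Int) + 2)
        = ((nb t mid - j : Nat) : Int) := by
  intro fuel
  induction fuel with
  | zero => intro j _ h; omega
  | succ fuel ih =>
    intro j hj hfuel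
    have hstep : t * (tri j : Int) + t * ((j : Int) + 1) = t * (tri (j + 1) : Int) := by
      simp only [tri]; push_cast; ring
    simp only [pyLoopA, hstep]
    by_cases hc : t * (tri (j + 1) : Int) ≤ mid
    · rw [if_pos hc]
      have hj1 : j + 1 ≤ nb t mid := (cond_iff t mid hpos (j + 1) (by omega)).mp hc
      have := ih (j + 1) hj1 (by omega)
      -- rewrite the recursive call's arguments to match ih's shape
      have harg : pyLoopA t mid fuel (t * ((j : Int) + 2)) (t * (tri (j + 1) : Int)) ((j : Int) + 3)
          = ((nb t mid - (j + 1) : Nat) : Int) := by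
        have h2 : t * ((j : Int) + 2) = t * (((j + 1 : Nat) : Int) + 1) := by push_cast; ring
        have h3 : (j : Int) + 3 = ((j + 1 : Nat) : Int) + 2 := by push_cast; ring
        rw [h2, h3]; exact this
      have hk : (j : Int) + 2 + 1 = (j : Int) + 3 := by ring
      rw [hk, harg]
      omega
    · rw [if_neg hc]
      have : ¬ (j + 1 ≤ nb t mid) := fun h => hc ((cond_iff t mid hpos (j + 1) (by omega)).mpr h)
      have : nb t mid = j := by omega
      omega

-- The fuel mid.toNat + 1 suffices: nb t mid ≤ mid.toNat for admitted cooks.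
theorem nb_le (t mid : Int) (hpos : 0 < t) : nb t mid ≤ mid.toNat := by
  by_cases h0 : nb t mid = 0
  · omega
  · have hn : 1 ≤ nb t mid := by omega
    have hmt : ¬ mid < t := by
      intro h; simp [nb, h] at h0
    push_neg at hmt
    have hcond : t * (tri (nb t mid) : Int) ≤ mid :=
      (cond_iff t mid hpos (nb t mid) hn).mpr (le_refl _)
    have h1 : (tri (nb t mid) : Int) ≤ t * (tri (nb t mid) : Int) := by
      have : (0 : Int) ≤ (tri (nb t mid) : Int) := by positivity
      nlinarith
    have h2 : (nb t mid : Int) ≤ (tri (nb t mid) : Int) := by exact_mod_cast le_tri _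
    omega

-- A's full inner loop equals B's closed form for an admitted cook.
theorem inner_eq (t mid : Int) (ht : 0 < t ∨ mid < t) :
    pyLoopA t mid (mid.toNat + 1) t 0 2 = altCount t mid := by
  by_cases hpos : 0 < t
  case neg =>
    -- then mid < t ≤ 0: the loop condition fails at once and B returns 0
    have hmt : mid < t := by rcases ht with h | h <;> omega
    simp [pyLoopA, altCount, hmt, show ¬ (0 + t ≤ mid) by omega]
  have h := loopA_run t mid hpos (mid.toNat + 1) 0 (Nat.zero_le _)
      (by have := nb_le t mid hpos; omega)
  norm_num [tri] at h
  rw [h]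
  -- altCount t mid = ↑(nb t mid)
  by_cases hmt : mid < t
  · simp [altCount, nb, hmt]
  · push_neg at hmt
    have hm0 : 0 ≤ PySem.Int.floordiv mid t := by
      rw [PySem.Int.floordiv_eq_ediv_of_pos hpos]
      exact Int.ediv_nonneg (by omega) (le_of_lt hpos)
    set m := PySem.Int.floordiv mid t with hm
    have hs1 : 1 ≤ Nat.sqrt (8 * m + 1).toNat := by
      exact Nat.sqrt_pos.mpr (by omega)
    simp only [altCount, nb, if_neg (not_lt.mpr hmt), ← hm]
    have hcast : (Nat.sqrt (8 * m + 1).toNat : Int) - 1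
        = ((Nat.sqrt (8 * m + 1).toNat - 1 : Nat) : Int) := by omega
    rw [hcast]
    have := PySem.Int.floordiv_natCast (Nat.sqrt (8 * m + 1).toNat - 1) 2
    simp only [Nat.cast_ofNat] at this ⊢
    omega

-- ===== VERDICT (by name: the statement is the Claim_ definition above) =====
theorem poss_check_spec : Claim_equal_poss_check := by
  intro R L P mid _hdom hpre
  obtain ⟨_hL, hpos⟩ := hpre
  have hfold : List.foldl
      (fun acc i => acc + pyLoopA (R.getD i 0) mid (mid.toNat + 1) (R.getD i 0) 0 2) 0
      (List.range L.toNat)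
      = List.foldl (fun acc i => acc + altCount (R.getD i 0) mid) 0 (List.range L.toNat) := by
    apply PySem.List.foldl_congr_mem
    intro acc i hi
    rw [inner_eq (R.getD i 0) mid (hpos i hi)]
  unfold Spec_poss_check poss_check poss_check_alt
  show decide (P ≤ List.foldl
      (fun acc i => acc + pyLoopA (R.getD i 0) mid (mid.toNat + 1) (R.getD i 0) 0 2) 0
      (List.range L.toNat))
    = decide (P ≤ List.foldl (fun acc i => acc + altCount (R.getD i 0) mid) 0 (List.range L.toNat))
  rw [hfold]
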